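-- pv_equiv track=rewrite | github.com/AFDWang/Hetu-Galvatron | galvatron/core/profiler.py | generate_p2p_groups
-- ===== SOURCE A (Python) =====
-- def generate_p2p_groups(world_size, pp_size):
--     pp_size = int(pp_size)
--     num_pp_groups = int(world_size // pp_size)
--     pp_groups = []
--     for i in range(num_pp_groups):
--         ranks = list(range(i, world_size, num_pp_groups))
--         pp_groups.append(ranks)
--     return pp_groups
-- ===== SOURCE B (Python) =====
-- def generate_p2p_groups(world_size, pp_size):
--     pp_size = int(pp_size)
--     num_pp_groups = int(world_size // pp_size)
--     if num_pp_groups <= 0: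
--         return []
--     pp_groups = [[] for _ in range(num_pp_groups)]
--     r = 0
--     while r < world_size:
--         pp_groups[r % num_pp_groups].append(r)
--         r += 1
--     return pp_groups
-- ===== Notes on version B (the rewrite author's own statement) =====
-- stated objective: alternative
-- what changed: B makes a single forward pass over the ranks with a while loop, bucketing rank r into pre-allocated group r % num_pp_groups, instead of A's per-group construction of a stride range for each group index.
import Mathlib
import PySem

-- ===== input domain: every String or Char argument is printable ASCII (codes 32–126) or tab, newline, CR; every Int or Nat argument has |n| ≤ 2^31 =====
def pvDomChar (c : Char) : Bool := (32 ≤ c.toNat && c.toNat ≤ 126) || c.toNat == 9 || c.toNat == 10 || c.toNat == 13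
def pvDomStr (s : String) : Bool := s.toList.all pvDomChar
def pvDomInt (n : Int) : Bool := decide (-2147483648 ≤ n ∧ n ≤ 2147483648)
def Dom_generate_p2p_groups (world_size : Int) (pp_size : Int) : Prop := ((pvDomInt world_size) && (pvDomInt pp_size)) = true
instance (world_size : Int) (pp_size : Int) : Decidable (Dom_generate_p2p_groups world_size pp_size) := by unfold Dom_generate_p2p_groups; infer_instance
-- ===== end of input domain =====

-- B replaces A's per-group stride-range construction by one forward while-loop over the
-- ranks that buckets rank r into pre-allocated group r % num_pp_groups (alternative decomposition).

-- ===== PORT A =====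
def generate_p2p_groups (world_size : Int) (pp_size : Int) : List (List Int) :=
  let num_pp_groups : Int := PySem.Int.floordiv world_size pp_size
  (PySem.List.pyRange 0 num_pp_groups 1).foldl
    (fun pp_groups i => pp_groups ++ [PySem.List.pyRange i world_size num_pp_groups]) []

-- ===== PORT B =====
-- the 'while r < world_size' loop of Source B, as structural recursion on the remaining ranks
def pvBucketLoop (world_size num_pp_groups : Int) (r : Int) (pp_groups : List (List Int)) :
    List (List Int) :=
  if h : r < world_size then
    pvBucketLoop world_size num_pp_groups (r + 1)
      (pp_groups.modify (PySem.Int.mod r num_pp_groups).toNat (fun g => g ++ [r]))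
  else pp_groups
termination_by (world_size - r).toNat
decreasing_by omega

def generate_p2p_groups_alt (world_size : Int) (pp_size : Int) : List (List Int) :=
  let num_pp_groups : Int := PySem.Int.floordiv world_size pp_size
  if num_pp_groups ≤ 0 then []
  else pvBucketLoop world_size num_pp_groups 0 (List.replicate num_pp_groups.toNat [])

-- ===== PRECONDITION & SPEC =====
-- Python A raises ZeroDivisionError when pp_size == 0; everywhere else it returns.
def Pre_generate_p2p_groups (world_size : Int) (pp_size : Int) : Prop := pp_size ≠ 0
instance (world_size : Int) (pp_size : Int) : Decidable (Pre_generate_p2p_groups world_size pp_size) := by unfold Pre_generate_p2p_groups; infer_instance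
def pvWitness_generate_p2p_groups : Int × Int := (8, 2)
def Spec_generate_p2p_groups (world_size : Int) (pp_size : Int) (out : List (List Int)) : Prop := out = generate_p2p_groups_alt world_size pp_size
instance (world_size : Int) (pp_size : Int) (out : List (List Int)) : Decidable (Spec_generate_p2p_groups world_size pp_size out) := by unfold Spec_generate_p2p_groups; infer_instance

-- ===== CLAIM (what is proved, stated in full; the proofs are below) =====
def Claim_equal_generate_p2p_groups : Prop := ∀ (world_size : Int) (pp_size : Int), Dom_generate_p2p_groups world_size pp_size → Pre_generate_p2p_groups world_size pp_size → Spec_generate_p2p_groups world_size pp_size (generate_p2p_groups world_size pp_size)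

-- ===== LEMMAS AND PROOFS =====

lemma foldl_snoc_eq_map (f : Int → List Int) (l : List Int) : ∀ (acc : List (List Int)),
    l.foldl (fun a i => a ++ [f i]) acc = acc ++ l.map f := by
  induction l with
  | nil => intro acc; simp
  | cons x xs ih => intro acc; simp only [List.foldl_cons, List.map_cons]; rw [ih]; simp

lemma pyRange_empty_of_le {a b n : Int} (hn : 0 < n) (h : b ≤ a) : PySem.List.pyRange a b n = [] := by
  rw [PySem.List.pyRange_of_pos _ _ hn, if_neg (by omega)]; simp

lemma pyRange_succ_top {a b n : Int} (hn : 0 < n) :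
    PySem.List.pyRange a (b + 1) n =
      PySem.List.pyRange a b n ++ (if a ≤ b ∧ n ∣ b - a then [b] else []) := by
  rcases lt_trichotomy a b with hab | hab | hab
  · have hq0 : 0 ≤ (b - a) / n := Int.ediv_nonneg (by omega) (by omega)
    have hkey : n * ((b - a) / n) + (b - a) % n = b - a := Int.ediv_add_emod _ _
    have hr0 : 0 ≤ (b - a) % n := Int.emod_nonneg _ (by omega)
    have hrn : (b - a) % n < n := Int.emod_lt_of_pos _ hn
    set q := (b - a) / n with hqdef
    set r := (b - a) % n with hrdef
    rw [PySem.List.pyRange_of_pos a (b + 1) hn, PySem.List.pyRange_of_pos a b hn,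
      if_pos (by omega : a < b + 1), if_pos hab]
    by_cases hr : r = 0
    · have hlen1 : (b + 1 - a + n - 1) / n = q + 1 := by
        have hmul : n * (q + 1) = n * q + n := by ring
        have : b + 1 - a + n - 1 = 0 + n * (q + 1) := by omega
        rw [this, Int.add_mul_ediv_left 0 (q + 1) (by omega : n ≠ 0)]
        simp
      have hlen0 : (b - a + n - 1) / n = q := by
        have : b - a + n - 1 = (n - 1) + n * q := by omega
        rw [this, Int.add_mul_ediv_left (n - 1) q (by omega : n ≠ 0)]
        rw [Int.ediv_eq_zero_of_lt (by omega) (by omega)]; omega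
      rw [hlen1, hlen0, if_pos ⟨by omega, ⟨q, by omega⟩⟩]
      have hq1 : (q + 1).toNat = q.toNat + 1 := by omega
      rw [hq1, List.range_succ, List.map_append]
      congr 1
      simp only [List.map_cons, List.map_nil]
      congr 1
      have hq : (q.toNat : Int) = q := Int.toNat_of_nonneg hq0
      have : n * (q.toNat : Int) = n * q := by rw [hq]
      omega
    · have hnd : ¬ n ∣ b - a := by
        rintro ⟨c, hc⟩
        apply hr
        rw [hrdef, hc, Int.mul_emod_right]
      have hlen1 : (b + 1 - a + n - 1) / n = q + 1 := by
        have hmul : n * (q + 1) = n * q + n := by ring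
        have : b + 1 - a + n - 1 = r + n * (q + 1) := by omega
        rw [this, Int.add_mul_ediv_left r (q + 1) (by omega : n ≠ 0)]
        rw [Int.ediv_eq_zero_of_lt (by omega) (by omega)]; omega
      have hlen0 : (b - a + n - 1) / n = q + 1 := by
        have hmul : n * (q + 1) = n * q + n := by ring
        have : b - a + n - 1 = (r - 1) + n * (q + 1) := by omega
        rw [this, Int.add_mul_ediv_left (r - 1) (q + 1) (by omega : n ≠ 0)]
        rw [Int.ediv_eq_zero_of_lt (by omega) (by omega)]; omega
      rw [hlen1, hlen0, if_neg (by tauto)]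
      simp
  · subst hab
    rw [PySem.List.pyRange_of_pos a (a + 1) hn, if_pos (by omega)]
    have h1 : (a + 1 - a + n - 1) / n = 1 := by
      have : a + 1 - a + n - 1 = 0 + n * 1 := by omega
      rw [this, Int.add_mul_ediv_left 0 1 (by omega : n ≠ 0)]
      simp
    rw [h1, pyRange_empty_of_le hn (le_refl a), if_pos ⟨le_refl a, by simp⟩]
    simp
  · rw [pyRange_empty_of_le hn (by omega), pyRange_empty_of_le hn (by omega),
      if_neg (by omega)]
    simp

lemma bucket_iff {n m k : Int} (hn : 0 < n) (hm : 0 ≤ m) (hk0 : 0 ≤ k) (hkn : k < n) :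
    (k ≤ m ∧ n ∣ m - k) ↔ k = m % n := by
  constructor
  · rintro ⟨hkm, c, hc⟩
    have : m = k + n * c := by omega
    rw [this, Int.add_mul_emod_self_left, Int.emod_eq_of_lt hk0 hkn]
  · intro hk
    have hkey : n * (m / n) + m % n = m := Int.ediv_add_emod _ _
    have hq0 : 0 ≤ m / n := Int.ediv_nonneg hm (by omega)
    constructor
    · nlinarith
    · exact ⟨m / n, by omega⟩

-- the while loop, read backwards: running one more step at the top end
lemma bucketLoop_succ_top {ws n : Int} (r : Int) (hr : r ≤ ws) :
    ∀ (g : List (List Int)),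
      pvBucketLoop (ws + 1) n r g =
        (pvBucketLoop ws n r g).modify (PySem.Int.mod ws n).toNat (fun g => g ++ [ws]) := by
  induction r, hr using Int.le_induction_down with
  | base =>
    intro g
    rw [pvBucketLoop, dif_pos (by omega : ws < ws + 1), pvBucketLoop,
      dif_neg (by omega : ¬ ws + 1 < ws + 1), pvBucketLoop, dif_neg (lt_irrefl ws)]
  | pred r hr ih =>
    intro g
    rw [pvBucketLoop, dif_pos (by omega : r - 1 < ws + 1)]
    conv_rhs => rw [pvBucketLoop, dif_pos (by omega : r - 1 < ws)]
    simpa using ih _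

lemma bucketLoop_inv {n : Int} (hn : 0 < n) : ∀ m : Int, 0 ≤ m →
    pvBucketLoop m n 0 (List.replicate n.toNat []) =
    (PySem.List.pyRange 0 n 1).map (fun i => PySem.List.pyRange i m n) := by
  intro m hm
  induction m, hm using Int.le_induction with
  | base =>
    rw [pvBucketLoop, dif_neg (by omega)]
    rw [List.map_congr_left (g := fun _ => ([] : List Int))
      (fun i hi => pyRange_empty_of_le hn (PySem.List.mem_pyRange_one.mp hi).1)]
    simp [List.map_const', PySem.List.length_pyRange_one]
  | succ m hm ih =>
    rw [bucketLoop_succ_top 0 hm, ih, PySem.Int.mod_eq_emod_of_pos hn]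
    have hr0 : 0 ≤ m % n := Int.emod_nonneg _ (by omega)
    apply List.ext_getElem
    · simp
    · intro k h1 h2
      have hkn : (k : Int) < n := by
        have := h2
        simp [PySem.List.length_pyRange_one] at this
        omega
      rw [List.getElem_modify, List.getElem_map, List.getElem_map,
        PySem.List.getElem_pyRange_one]
      simp only [zero_add]
      rw [pyRange_succ_top hn]
      have hcond : ((m % n).toNat = k) ↔ ((k : Int) ≤ m ∧ n ∣ m - (k : Int)) := by
        rw [bucket_iff hn hm (by omega) hkn]
        omega
      by_cases hc : (m % n).toNat = k
      · rw [if_pos hc, if_pos (hcond.mp hc)]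
      · rw [if_neg hc, if_neg (fun h => hc (hcond.mpr h))]
        simp

-- ===== VERDICT (by name: the statement is the Claim_ definition above) =====
theorem generate_p2p_groups_spec : Claim_equal_generate_p2p_groups := by
  intro ws pp _ _
  simp only [Spec_generate_p2p_groups, generate_p2p_groups, generate_p2p_groups_alt]
  set n : Int := PySem.Int.floordiv ws pp with hndef
  by_cases hn : 0 < n
  · rw [if_neg (by omega)]
    rw [foldl_snoc_eq_map]
    by_cases hws : 0 ≤ ws
    · rw [bucketLoop_inv hn ws hws]; simp
    · rw [pvBucketLoop, dif_neg (by omega)]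
      rw [List.map_congr_left (g := fun _ => ([] : List Int))
        (fun i hi => pyRange_empty_of_le hn
          (by have := (PySem.List.mem_pyRange_one.mp hi).1; omega))]
      simp [List.map_const', PySem.List.length_pyRange_one]
  · rw [if_pos (by omega), PySem.List.pyRange_one_eq_nil (by omega : n ≤ 0), List.foldl_nil]
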